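-- pv_equiv track=rewrite | github.com/zhangxinfang520/suanfa | 剑指offer/查找回文字串.py | find_singe
-- ===== SOURCE A (Python) =====
-- def find_singe(s, i, j):
--     n = len(s)
--     res = 0
--     while i >= 0 and j < n and s[i] == s[j]:
--         i -= 1
--         j += 1
--         res += 1
--     return res, s[i + 1:j]
-- ===== SOURCE B (Python) =====
-- def find_singe(s, i, j):
--     left = (s[:i + 1] if i >= 0 else "")[::-1]
--     right = s[j:]
--     res = 0
--     for a, b in zip(left, right):
--         if a != b:
--             break
--         res += 1
--     return res, s[i + 1 - res:j + res]
-- ===== Notes on version B (the rewrite author's own statement) =====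
-- stated objective: alternative
-- what changed: Replaces the two-pointer while loop with explicit bound checks by building the reversed prefix s[:i+1][::-1] and the suffix s[j:], counting the leading run of equal pairs of their zip (zip truncates at the boundaries), and slicing s[i+1-res:j+res].
-- outside the precondition, e.g. on find_singe('aaa', 2, -1): A returns (3, 'aa'), B returns (1, '')
import Mathlib
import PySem

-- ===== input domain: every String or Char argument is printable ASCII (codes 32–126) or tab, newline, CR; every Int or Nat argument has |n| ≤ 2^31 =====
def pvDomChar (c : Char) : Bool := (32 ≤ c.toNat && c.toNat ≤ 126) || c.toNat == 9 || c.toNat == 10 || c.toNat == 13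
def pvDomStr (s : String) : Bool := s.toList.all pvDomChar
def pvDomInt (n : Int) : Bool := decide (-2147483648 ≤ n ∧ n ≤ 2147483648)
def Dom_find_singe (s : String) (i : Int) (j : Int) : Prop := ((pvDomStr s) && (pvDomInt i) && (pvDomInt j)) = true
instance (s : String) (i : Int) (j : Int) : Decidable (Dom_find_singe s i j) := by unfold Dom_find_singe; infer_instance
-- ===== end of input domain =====

-- B replaces the two-pointer while loop by zip-and-count over the reversed prefix and the suffix (alternative decomposition, same cost); equivalence proved on non-negative j with no IndexError.


-- ===== PORT A =====
-- while i >= 0 and j < n and s[i] == s[j]: i -= 1; j += 1; res += 1   (returns the final i, j, res)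
def findSingeLoop (cs : List Char) (n : Int) (i : Int) (j : Int) (res : Int) : Int × Int × Int :=
  if h : 0 ≤ i ∧ j < n ∧ PySem.List.pyGet? cs i = PySem.List.pyGet? cs j then
    findSingeLoop cs n (i - 1) (j + 1) (res + 1)
  else (i, j, res)
termination_by (i + 1).toNat
decreasing_by omega

def find_singe (s : String) (i : Int) (j : Int) : Int × String :=
  let n : Int := PySem.Str.len s
  let r := findSingeLoop s.toList n i j 0
  (r.2.2, PySem.Str.slice s (some (r.1 + 1)) (some r.2.1))

-- ===== PORT B =====
-- for a, b in zip(left, right): if a != b: break; res += 1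
def leadEq : List (Char × Char) → Int → Int
  | [], res => res
  | (a, b) :: t, res => if a ≠ b then res else leadEq t (res + 1)

def find_singe_alt (s : String) (i : Int) (j : Int) : Int × String :=
  let left := (if 0 ≤ i then PySem.List.slice s.toList none (some (i + 1)) else []).reverse
  let right := PySem.List.slice s.toList (some j) none
  let res := leadEq (left.zip right) 0
  (res, PySem.Str.slice s (some (i + 1 - res)) (some (j + res)))

-- ===== PRECONDITION & SPEC =====
-- Pre_ excludes (a) inputs where A raises IndexError (0 ≤ i with n ≤ i while j < n, or j < -n with 0 ≤ i)
-- and (b) negative j, on which A's s[j] negative-index wraparound comparison is accidental though it returns.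
def Pre_find_singe (s : String) (i : Int) (j : Int) : Prop :=
  0 ≤ j ∧ (i < (s.toList.length : Int) ∨ (s.toList.length : Int) ≤ j)
instance (s : String) (i : Int) (j : Int) : Decidable (Pre_find_singe s i j) := by
  unfold Pre_find_singe; infer_instance

def pvWitness_find_singe : String × Int × Int := ("abacaba", 3, 3)

def Spec_find_singe (s : String) (i : Int) (j : Int) (out : Int × String) : Prop := out = find_singe_alt s i j
instance (s : String) (i : Int) (j : Int) (out : Int × String) : Decidable (Spec_find_singe s i j out) := by
  unfold Spec_find_singe; infer_instance

-- ===== CLAIM (what is proved, stated in full; the proofs are below) =====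
def Claim_equal_find_singe : Prop := ∀ (s : String) (i : Int) (j : Int), Dom_find_singe s i j → Pre_find_singe s i j → Spec_find_singe s i j (find_singe s i j)

-- ===== LEMMAS AND PROOFS =====

-- length of the leading run of equal pairs
def natRun : List (Char × Char) → Nat
  | [] => 0
  | (a, b) :: t => if a = b then natRun t + 1 else 0

theorem leadEq_eq_natRun (l : List (Char × Char)) (res : Int) :
    leadEq l res = res + (natRun l : Int) := by
  induction l generalizing res with
  | nil => simp [leadEq, natRun]
  | cons p t ih =>
    obtain ⟨a, b⟩ := p
    by_cases hab : a = b <;> simp [leadEq, natRun, hab, ih] <;> omega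

theorem findSingeLoop_eq (cs : List Char) (m : Nat) : ∀ (i j res : Int),
    (i + 1).toNat = m → 0 ≤ j → (i < (cs.length : Int) ∨ (cs.length : Int) ≤ j) →
    findSingeLoop cs (cs.length : Int) i j res =
      (i - (natRun (((cs.take (i + 1).toNat).reverse).zip (cs.drop j.toNat)) : Int),
       j + (natRun (((cs.take (i + 1).toNat).reverse).zip (cs.drop j.toNat)) : Int),
       res + (natRun (((cs.take (i + 1).toNat).reverse).zip (cs.drop j.toNat)) : Int)) := by
  induction m using Nat.strong_induction_on with
  | _ m IH =>
  intro i j res hm hj hd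
  rw [findSingeLoop]
  by_cases h : 0 ≤ i ∧ j < (cs.length : Int) ∧ PySem.List.pyGet? cs i = PySem.List.pyGet? cs j
  · rw [dif_pos h]
    obtain ⟨hi0, hjn, he⟩ := h
    have hin : i < (cs.length : Int) := by
      rcases hd with h' | h'
      · exact h'
      · omega
    have hi' : i.toNat < cs.length := by omega
    have hj' : j.toNat < cs.length := by omega
    rw [← Int.toNat_of_nonneg hi0, ← Int.toNat_of_nonneg hj] at he
    simp only [PySem.List.pyGet?_natCast, List.getElem?_eq_getElem hi',
      List.getElem?_eq_getElem hj', Option.some.injEq] at he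
    have htake : (cs.take (i + 1).toNat).reverse = cs[i.toNat] :: (cs.take i.toNat).reverse := by
      have e : (i + 1).toNat = i.toNat + 1 := by omega
      rw [e, List.take_add_one, List.getElem?_eq_getElem hi']
      simp
    have hdrop : cs.drop j.toNat = cs[j.toNat] :: cs.drop (j + 1).toNat := by
      have e : (j + 1).toNat = j.toNat + 1 := by omega
      rw [e]
      exact List.drop_eq_getElem_cons hj'
    rw [IH (i - 1 + 1).toNat (by omega) (i - 1) (j + 1) (res + 1) rfl (by omega)
      (Or.inl (by omega))]
    have e2 : (i - 1 + 1).toNat = i.toNat := by omega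
    rw [e2]
    have hK : natRun (((cs.take (i + 1).toNat).reverse).zip (cs.drop j.toNat)) =
        natRun (((cs.take i.toNat).reverse).zip (cs.drop (j + 1).toNat)) + 1 := by
      rw [htake, hdrop, List.zip_cons_cons]
      simp [natRun, he]
    rw [hK]
    simp only [Prod.mk.injEq]
    push_cast
    refine ⟨by omega, by omega, by omega⟩
  · rw [dif_neg h]
    suffices hK : natRun (((cs.take (i + 1).toNat).reverse).zip (cs.drop j.toNat)) = 0 by
      rw [hK]
      simp
    by_cases hi0 : 0 ≤ i
    · by_cases hjn : j < (cs.length : Int)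
      · have hin : i < (cs.length : Int) := by
          rcases hd with h' | h'
          · exact h'
          · omega
        have hi' : i.toNat < cs.length := by omega
        have hj' : j.toNat < cs.length := by omega
        have hne : ¬ PySem.List.pyGet? cs i = PySem.List.pyGet? cs j := fun he => h ⟨hi0, hjn, he⟩
        have hne' : cs[i.toNat] ≠ cs[j.toNat] := by
          intro hcontra
          apply hne
          rw [← Int.toNat_of_nonneg hi0, ← Int.toNat_of_nonneg hj]
          simp only [PySem.List.pyGet?_natCast, List.getElem?_eq_getElem hi',
            List.getElem?_eq_getElem hj', hcontra]
        have htake : (cs.take (i + 1).toNat).reverse = cs[i.toNat] :: (cs.take i.toNat).reverse := by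
          have e : (i + 1).toNat = i.toNat + 1 := by omega
          rw [e, List.take_add_one, List.getElem?_eq_getElem hi']
          simp
        have hdrop : cs.drop j.toNat = cs[j.toNat] :: cs.drop (j + 1).toNat := by
          have e : (j + 1).toNat = j.toNat + 1 := by omega
          rw [e]
          exact List.drop_eq_getElem_cons hj'
        rw [htake, hdrop, List.zip_cons_cons]
        simp [natRun, hne']
      · have hdnil : cs.drop j.toNat = [] := by
          apply List.drop_eq_nil_of_le
          omega
        rw [hdnil, List.zip_nil_right]
        rfl
    · have e : (i + 1).toNat = 0 := by omega
      rw [e]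
      simp [natRun]

-- ===== VERDICT (by name: the statement is the Claim_ definition above) =====
theorem find_singe_spec : Claim_equal_find_singe := by
  intro s i j _ hpre
  obtain ⟨hj, hd⟩ := hpre
  simp only [Spec_find_singe, find_singe, find_singe_alt, PySem.Str.len_eq]
  rw [findSingeLoop_eq s.toList (i + 1).toNat i j 0 rfl hj hd]
  dsimp only
  have hleft : (if 0 ≤ i then PySem.List.slice s.toList none (some (i + 1)) else []) =
      s.toList.take (i + 1).toNat := by
    by_cases hi0 : 0 ≤ i
    · rw [if_pos hi0, PySem.List.slice_to s.toList (by omega)]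
    · rw [if_neg hi0]
      have e : (i + 1).toNat = 0 := by omega
      rw [e, List.take_zero]
  rw [hleft, PySem.List.slice_from s.toList hj, leadEq_eq_natRun]
  simp only [zero_add, Prod.mk.injEq]
  refine ⟨by trivial, ?_⟩
  congr 2
  omega
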